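-- pv_equiv track=rewrite | github.com/pepper99/competitive-programming | Advent of Code/2021/d11.py | surround
-- ===== SOURCE A (Python) =====
-- def surround(g, flash, i, j, h, w):
--     count = 1
--     flash[i][j] = True
--     d = [(1,0),(-1,0),(0,1),(0,-1),(1,-1),(1,1),(-1,1),(-1,-1)]
--     for dx,dy in d:
--         x = dx + j; y = dy + i
--         if 0 <= y < h and 0 <= x < w and g[y][x] != 0:
--             g[y][x] = (g[y][x] + 1) % 10
--             if not flash[y][x] and g[y][x] == 0:
--                 count += surround(g,flash,y,x,h,w)
--     return count
-- ===== SOURCE B (Python) =====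
-- def surround(g, flash, i, j, h, w):
--     # Iterative version: explicit worklist of (row, col, next-direction-index)
--     # frames instead of recursion; flash marking and counting happen at push
--     # time.  Same visit order and same g/flash mutations as the recursive code.
--     d = [(1,0),(-1,0),(0,1),(0,-1),(1,-1),(1,1),(-1,1),(-1,-1)]
--     flash[i][j] = True
--     total = 1
--     work = [(i, j, 0)]
--     while work:
--         r, c, k = work.pop()
--         if k >= 8:
--             continue
--         work.append((r, c, k + 1))
--         dx, dy = d[k]
--         y = dy + r
--         x = dx + c
--         if y < 0 or y >= h or x < 0 or x >= w:
--             continue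
--         v = g[y][x]
--         if v == 0:
--             continue
--         v = (v + 1) % 10
--         g[y][x] = v
--         if v == 0 and not flash[y][x]:
--             flash[y][x] = True
--             total += 1
--             work.append((y, x, 0))
--     return total
-- ===== Notes on version B (the rewrite author's own statement) =====
-- stated objective: alternative
-- what changed: The recursion is replaced by an explicit stack of (row, col, next-direction-index) frames driven by a single while loop, with flash-marking and counting moved to push time (an iterative, defunctionalized version of the same DFS, immune to RecursionError); both versions mutate g and flash identically.
-- outside the precondition, e.g. on surround([[1, 5]], [[False, False]], 0, 0, 1, 3): A returns 1, B returns 1; on surround([[1]], [[False]], 0, 0, 5, 0): A returns 1, B returns 1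
import Mathlib
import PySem

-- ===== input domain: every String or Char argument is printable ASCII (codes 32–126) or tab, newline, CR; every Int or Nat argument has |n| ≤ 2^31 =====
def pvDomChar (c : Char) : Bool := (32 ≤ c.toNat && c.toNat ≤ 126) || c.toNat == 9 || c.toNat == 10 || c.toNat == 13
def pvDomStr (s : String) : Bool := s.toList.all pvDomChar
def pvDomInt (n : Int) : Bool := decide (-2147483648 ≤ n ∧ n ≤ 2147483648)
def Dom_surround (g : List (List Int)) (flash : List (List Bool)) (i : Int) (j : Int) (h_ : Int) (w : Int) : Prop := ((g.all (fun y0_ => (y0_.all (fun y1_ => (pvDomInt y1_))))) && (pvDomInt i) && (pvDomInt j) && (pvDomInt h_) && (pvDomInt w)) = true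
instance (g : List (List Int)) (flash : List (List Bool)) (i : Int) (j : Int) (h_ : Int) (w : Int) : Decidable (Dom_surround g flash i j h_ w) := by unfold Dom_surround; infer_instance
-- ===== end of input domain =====

-- B replaces A's recursion by an explicit stack of (row, col, next-direction-index) frames
-- popped by a single while loop (same visit order, same mutations of g and flash; the
-- theorems below are about the RETURN VALUE — both Pythons mutate g and flash identically).

-- ===== PORT A =====
-- Python subscript helpers (shared data accessors).  nidx models Python's negative-index
-- wraparound; all OTHER subscripts in both programs are guarded by `0 <= _`, so they use
-- plain .toNat.  Out-of-range writes/reads (IndexError in Python) are excluded by Pre_.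
def nidx (n : Int) (len : Nat) : Nat := (if n < 0 then n + (len : Int) else n).toNat

def gget (g : List (List Int)) (y x : Int) : Int := (g.getD y.toNat []).getD x.toNat 0

def gset (g : List (List Int)) (y x : Int) (v : Int) : List (List Int) :=
  g.set y.toNat ((g.getD y.toNat []).set x.toNat v)

def fget (f : List (List Bool)) (y x : Int) : Bool := (f.getD y.toNat []).getD x.toNat false

-- flash[y][x] = v, with wraparound on each level (used with a possibly negative top-level i, j)
def fsetw (f : List (List Bool)) (y x : Int) (v : Bool) : List (List Bool) :=
  f.set (nidx y f.length) ((f.getD (nidx y f.length) []).set (nidx x (f.getD (nidx y f.length) []).length) v)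

-- fuel for A's recursion: the number of not-yet-flashed cells (+1); each recursive call
-- permanently flips one false flag, so this fuel is never exhausted (proved below)
def pvCf (f : List (List Bool)) : Nat := (f.map (fun r => r.countP (fun b => !b))).sum

def dirsA : List (Int × Int) := [(1,0),(-1,0),(0,1),(0,-1),(1,-1),(1,1),(-1,1),(-1,-1)]

-- one body of Python A: count = 1; flash[i][j] = True; then the for-loop over d,
-- state = (count, g, flash); the recursive call runs on one fuel less (n = 0 is the
-- fuel-exhaustion case, unreachable under Pre_)
def surroundRec : Nat → List (List Int) → List (List Bool) → Int → Int → Int → Int →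
    Int × List (List Int) × List (List Bool)
  | 0, g, f, _, _, _, _ => (0, g, f)
  | n + 1, g, f, i, j, h, w =>
    dirsA.foldl (fun acc dd =>
      if 0 ≤ dd.2 + i ∧ dd.2 + i < h ∧ 0 ≤ dd.1 + j ∧ dd.1 + j < w ∧
          gget acc.2.1 (dd.2 + i) (dd.1 + j) ≠ 0 then
        if fget acc.2.2 (dd.2 + i) (dd.1 + j) = false ∧
            gget (gset acc.2.1 (dd.2 + i) (dd.1 + j)
              (PySem.Int.mod (gget acc.2.1 (dd.2 + i) (dd.1 + j) + 1) 10)) (dd.2 + i) (dd.1 + j) = 0 then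
          (acc.1 + (surroundRec n (gset acc.2.1 (dd.2 + i) (dd.1 + j)
              (PySem.Int.mod (gget acc.2.1 (dd.2 + i) (dd.1 + j) + 1) 10)) acc.2.2 (dd.2 + i) (dd.1 + j) h w).1,
           (surroundRec n (gset acc.2.1 (dd.2 + i) (dd.1 + j)
              (PySem.Int.mod (gget acc.2.1 (dd.2 + i) (dd.1 + j) + 1) 10)) acc.2.2 (dd.2 + i) (dd.1 + j) h w).2)
        else (acc.1, gset acc.2.1 (dd.2 + i) (dd.1 + j)
              (PySem.Int.mod (gget acc.2.1 (dd.2 + i) (dd.1 + j) + 1) 10), acc.2.2)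
      else acc) (1, g, fsetw f i j true)

def surround (g : List (List Int)) (flash : List (List Bool)) (i : Int) (j : Int) (h_ : Int) (w : Int) : Int :=
  (surroundRec (pvCf flash + 1) g flash i j h_ w).1

-- ===== PORT B =====
def dirsB : List (Int × Int) := [(1,0),(-1,0),(0,1),(0,-1),(1,-1),(1,1),(-1,1),(-1,-1)]

-- B's while-loop over the explicit stack of (ci, cj, k) frames; the fuel only makes it
-- total in Lean (9·pvCf + 19 iterations are enough, proved below); none = fuel ran out
def mach : Nat → List (Int × Int × Nat) → Int → List (List Int) → List (List Bool) → Int → Int → Option Int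
  | 0, _, _, _, _, _, _ => none
  | _ + 1, [], total, _, _, _, _ => some total
  | n + 1, (r, c, k) :: rest, total, g, f, h, w =>
    if k < 8 then
      let dd := dirsB.getD k ((0:Int),(0:Int))
      let y := dd.2 + r
      let x := dd.1 + c
      if y < 0 ∨ y ≥ h ∨ x < 0 ∨ x ≥ w then mach n ((r, c, k + 1) :: rest) total g f h w
      else if gget g y x = 0 then mach n ((r, c, k + 1) :: rest) total g f h w
      else
        let v := PySem.Int.mod (gget g y x + 1) 10
        if v = 0 ∧ fget f y x = false then
          mach n ((y, x, 0) :: (r, c, k + 1) :: rest) (total + 1) (gset g y x v) (fsetw f y x true) h w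
        else mach n ((r, c, k + 1) :: rest) total (gset g y x v) f h w
    else mach n rest total g f h w

def surround_alt (g : List (List Int)) (flash : List (List Bool)) (i : Int) (j : Int) (h_ : Int) (w : Int) : Int :=
  (mach (9 * pvCf flash + 19) [(i, j, 0)] 1 g (fsetw flash i j true) h_ w).getD 1

-- ===== PRECONDITION & SPEC =====
-- Pre_ = the inputs on which Python A returns: i, j index into flash (negative wrapping
-- indices included), and h_, w are bounded by the actual numbers of rows/columns of g and
-- flash.  This is slightly narrower than A's exact return set: with oversized h_ or w, A
-- USUALLY raises IndexError on a neighbour probe, but a degenerate cascade can return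
-- without touching a missing cell (see the excluded examples in the claim).
def Pre_surround (g : List (List Int)) (flash : List (List Bool)) (i : Int) (j : Int) (h_ : Int) (w : Int) : Prop :=
  -(flash.length : Int) ≤ i ∧ i < (flash.length : Int) ∧
  -((flash.getD (nidx i flash.length) []).length : Int) ≤ j ∧
  j < ((flash.getD (nidx i flash.length) []).length : Int) ∧
  h_ ≤ (g.length : Int) ∧ h_ ≤ (flash.length : Int) ∧
  (∀ n < h_.toNat, w ≤ ((g.getD n []).length : Int) ∧ w ≤ ((flash.getD n []).length : Int))

instance (g : List (List Int)) (flash : List (List Bool)) (i : Int) (j : Int) (h_ : Int) (w : Int) : Decidable (Pre_surround g flash i j h_ w) := by unfold Pre_surround; infer_instance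

def pvWitness_surround : List (List Int) × List (List Bool) × Int × Int × Int × Int :=
  ([[9, 9], [9, 0]], [[false, false], [false, false]], 0, 0, 2, 2)

def Spec_surround (g : List (List Int)) (flash : List (List Bool)) (i : Int) (j : Int) (h_ : Int) (w : Int) (out : Int) : Prop := out = surround_alt g flash i j h_ w
instance (g : List (List Int)) (flash : List (List Bool)) (i : Int) (j : Int) (h_ : Int) (w : Int) (out : Int) : Decidable (Spec_surround g flash i j h_ w out) := by unfold Spec_surround; infer_instance

-- ===== CLAIM (what is proved, stated in full; the proofs are below) =====
def Claim_equal_surround : Prop := ∀ (g : List (List Int)) (flash : List (List Bool)) (i : Int) (j : Int) (h_ : Int) (w : Int), Dom_surround g flash i j h_ w → Pre_surround g flash i j h_ w → Spec_surround g flash i j h_ w (surround g flash i j h_ w)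

-- ===== LEMMAS AND PROOFS =====

-- the shape invariant the proof threads through both programs
def pvInv (g : List (List Int)) (f : List (List Bool)) (h w : Int) : Prop :=
  h ≤ (g.length : Int) ∧ h ≤ (f.length : Int) ∧
  (∀ n < h.toNat, w ≤ ((g.getD n []).length : Int) ∧ w ≤ ((f.getD n []).length : Int))

theorem pv_witness_ok : Dom_surround pvWitness_surround.1 pvWitness_surround.2.1 pvWitness_surround.2.2.1 pvWitness_surround.2.2.2.1 pvWitness_surround.2.2.2.2.1 pvWitness_surround.2.2.2.2.2 ∧ Pre_surround pvWitness_surround.1 pvWitness_surround.2.1 pvWitness_surround.2.2.1 pvWitness_surround.2.2.2.1 pvWitness_surround.2.2.2.2.1 pvWitness_surround.2.2.2.2.2 := by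
  constructor <;> decide


-- basic facts about set/getD -------------------------------------------------

theorem pv_getD_set {α : Type} (l : List α) (n m : Nat) (a d : α) :
    (l.set n a).getD m d = if n = m ∧ n < l.length then a else l.getD m d := by
  rw [List.getD_eq_getElem?_getD, List.getD_eq_getElem?_getD, List.getElem?_set]
  by_cases h1 : n = m
  · subst h1
    by_cases h2 : n < l.length <;> simp [h2]
  · simp [h1]

theorem fsetw_length (f : List (List Bool)) (y x : Int) (v : Bool) :
    (fsetw f y x v).length = f.length := by
  simp [fsetw]

theorem fsetw_row_len (f : List (List Bool)) (y x : Int) (v : Bool) (n : Nat) :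
    ((fsetw f y x v).getD n []).length = (f.getD n []).length := by
  unfold fsetw
  rw [pv_getD_set]
  split_ifs with h
  · rw [← h.1]; simp
  · rfl

theorem gset_length (g : List (List Int)) (y x : Int) (v : Int) :
    (gset g y x v).length = g.length := by
  simp [gset]

theorem gset_row_len (g : List (List Int)) (y x : Int) (v : Int) (n : Nat) :
    ((gset g y x v).getD n []).length = (g.getD n []).length := by
  unfold gset
  rw [pv_getD_set]
  split_ifs with h
  · rw [← h.1]; simp
  · rfl

theorem pvInv_gset {g : List (List Int)} {f : List (List Bool)} {h w : Int} (y x : Int) (v : Int)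
    (hI : pvInv g f h w) : pvInv (gset g y x v) f h w := by
  obtain ⟨h1, h2, h3⟩ := hI
  exact ⟨by rw [gset_length]; exact h1, h2,
    fun n hn => ⟨by rw [gset_row_len]; exact (h3 n hn).1, (h3 n hn).2⟩⟩

theorem pvInv_fsetw {g : List (List Int)} {f : List (List Bool)} {h w : Int} (y x : Int) (v : Bool)
    (hI : pvInv g f h w) : pvInv g (fsetw f y x v) h w := by
  obtain ⟨h1, h2, h3⟩ := hI
  exact ⟨h1, by rw [fsetw_length]; exact h2,
    fun n hn => ⟨(h3 n hn).1, by rw [fsetw_row_len]; exact (h3 n hn).2⟩⟩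

-- facts about the flash-counting fuel ----------------------------------------

theorem pvCf_cons (r : List Bool) (t : List (List Bool)) :
    pvCf (r :: t) = r.countP (fun b => !b) + pvCf t := by
  simp [pvCf]

theorem pvCf_set (f : List (List Bool)) (a : Nat) (r' : List Bool) (ha : a < f.length) :
    pvCf (f.set a r') + (f.getD a []).countP (fun b => !b) =
      pvCf f + r'.countP (fun b => !b) := by
  induction f generalizing a with
  | nil => simp at ha
  | cons r t ih =>
    cases a with
    | zero => simp [pvCf_cons]; omega
    | succ a' =>
      simp only [List.set, pvCf_cons, List.getD_cons_succ]
      have := ih a' (by simpa using ha)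
      omega

theorem countP_set_true_le (r : List Bool) (b : Nat) :
    (r.set b true).countP (fun x => !x) ≤ r.countP (fun x => !x) := by
  by_cases hb : b < r.length
  · rw [List.countP_set hb]
    split_ifs <;> simp_all
  · rw [List.set_eq_of_length_le (by omega)]

theorem countP_set_false (r : List Bool) (b : Nat) (hb : b < r.length)
    (hf : r.getD b false = false) :
    (r.set b true).countP (fun x => !x) + 1 = r.countP (fun x => !x) := by
  have hrb : r[b] = false := by
    rw [List.getD_eq_getElem?_getD, List.getElem?_eq_getElem hb] at hf
    simpa using hf
  have hpos : 0 < r.countP (fun x => !x) :=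
    List.countP_pos_iff.2 ⟨r[b], List.getElem_mem _, by simp [hrb]⟩
  rw [List.countP_set hb, hrb]
  simp
  omega

theorem pvCf_fsetw_le (f : List (List Bool)) (y x : Int) :
    pvCf (fsetw f y x true) ≤ pvCf f := by
  unfold fsetw
  by_cases ha : nidx y f.length < f.length
  · have h1 := pvCf_set f (nidx y f.length)
      ((f.getD (nidx y f.length) []).set (nidx x (f.getD (nidx y f.length) []).length) true) ha
    have h2 := countP_set_true_le (f.getD (nidx y f.length) [])
      (nidx x (f.getD (nidx y f.length) []).length)
    omega
  · rw [List.set_eq_of_length_le (by omega)]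

theorem pvCf_fsetw_false (f : List (List Bool)) (y x : Int) (hy : 0 ≤ y)
    (hyl : y.toNat < f.length) (hx : 0 ≤ x) (hxl : x.toNat < (f.getD y.toNat []).length)
    (hff : fget f y x = false) :
    pvCf (fsetw f y x true) + 1 = pvCf f := by
  have hny : nidx y f.length = y.toNat := by unfold nidx; rw [if_neg (by omega)]
  have hnx : nidx x (f.getD y.toNat []).length = x.toNat := by
    unfold nidx; rw [if_neg (by omega)]
  unfold fsetw
  rw [hny, hnx]
  have h1 := pvCf_set f y.toNat ((f.getD y.toNat []).set x.toNat true) hyl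
  have h2 := countP_set_false (f.getD y.toNat []) x.toNat hxl hff
  omega


-- the loop body of A, factored out for the proofs ----------------------------

def aStep (n : Nat) (dd : Int × Int) (i j h w : Int)
    (acc : Int × List (List Int) × List (List Bool)) :
    Int × List (List Int) × List (List Bool) :=
  if 0 ≤ dd.2 + i ∧ dd.2 + i < h ∧ 0 ≤ dd.1 + j ∧ dd.1 + j < w ∧
      gget acc.2.1 (dd.2 + i) (dd.1 + j) ≠ 0 then
    if fget acc.2.2 (dd.2 + i) (dd.1 + j) = false ∧
        gget (gset acc.2.1 (dd.2 + i) (dd.1 + j)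
          (PySem.Int.mod (gget acc.2.1 (dd.2 + i) (dd.1 + j) + 1) 10)) (dd.2 + i) (dd.1 + j) = 0 then
      (acc.1 + (surroundRec n (gset acc.2.1 (dd.2 + i) (dd.1 + j)
          (PySem.Int.mod (gget acc.2.1 (dd.2 + i) (dd.1 + j) + 1) 10)) acc.2.2 (dd.2 + i) (dd.1 + j) h w).1,
       (surroundRec n (gset acc.2.1 (dd.2 + i) (dd.1 + j)
          (PySem.Int.mod (gget acc.2.1 (dd.2 + i) (dd.1 + j) + 1) 10)) acc.2.2 (dd.2 + i) (dd.1 + j) h w).2)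
    else (acc.1, gset acc.2.1 (dd.2 + i) (dd.1 + j)
          (PySem.Int.mod (gget acc.2.1 (dd.2 + i) (dd.1 + j) + 1) 10), acc.2.2)
  else acc

-- A's loop from an arbitrary suffix of d, as a fold of aStep (definitionally the
-- fold inside surroundRec)
def aLoopF (n : Nat) (ds : List (Int × Int)) (i j h w : Int)
    (acc : Int × List (List Int) × List (List Bool)) : Int × List (List Int) × List (List Bool) :=
  ds.foldl (fun acc dd => aStep n dd i j h w acc) acc

theorem aLoopF_nil (n : Nat) (i j h w : Int) (acc : Int × List (List Int) × List (List Bool)) :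
    aLoopF n [] i j h w acc = acc := by
  simp [aLoopF]

theorem aLoopF_cons (n : Nat) (dd : Int × Int) (ds : List (Int × Int)) (i j h w : Int)
    (acc : Int × List (List Int) × List (List Bool)) :
    aLoopF n (dd :: ds) i j h w acc = aLoopF n ds i j h w (aStep n dd i j h w acc) := rfl

-- count is a pure accumulator of the loop ------------------------------------

theorem aStep_shift (n : Nat) (dd : Int × Int) (i j h w c : Int) (g : List (List Int))
    (f : List (List Bool)) :
    aStep n dd i j h w (c, g, f) =
      (c + (aStep n dd i j h w (0, g, f)).1, (aStep n dd i j h w (0, g, f)).2) := by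
  unfold aStep
  split_ifs
  · simp
  · simp
  · simp

theorem aLoopF_shift (n : Nat) (ds : List (Int × Int)) (i j h w c : Int)
    (g : List (List Int)) (f : List (List Bool)) :
    aLoopF n ds i j h w (c, g, f) =
      (c + (aLoopF n ds i j h w (0, g, f)).1, (aLoopF n ds i j h w (0, g, f)).2) := by
  induction ds generalizing c g f with
  | nil => simp [aLoopF_nil]
  | cons dd ds ih =>
    rw [aLoopF_cons, aLoopF_cons, aStep_shift]
    rcases hs : aStep n dd i j h w (0, g, f) with ⟨s1, s2, s3⟩
    rw [ih (c + s1) s2 s3, ih s1 s2 s3]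
    simp [add_assoc]

-- the loop preserves the shape invariant and never increases the fuel measure -

theorem pv_mono : ∀ (n : Nat) (ds : List (Int × Int)) (i j h w c : Int)
    (g : List (List Int)) (f : List (List Bool)), pvInv g f h w →
    pvInv (aLoopF n ds i j h w (c, g, f)).2.1 (aLoopF n ds i j h w (c, g, f)).2.2 h w ∧
    pvCf (aLoopF n ds i j h w (c, g, f)).2.2 ≤ pvCf f := by
  intro n
  induction n using Nat.strong_induction_on with
  | _ n IH =>
    intro ds
    induction ds with
    | nil =>
      intro i j h w c g f hI
      rw [aLoopF_nil]
      exact ⟨hI, le_refl _⟩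
    | cons dd ds ihds =>
      intro i j h w c g f hI
      rw [aLoopF_cons]
      by_cases hg : 0 ≤ dd.2 + i ∧ dd.2 + i < h ∧ 0 ≤ dd.1 + j ∧ dd.1 + j < w ∧
          gget g (dd.2 + i) (dd.1 + j) ≠ 0
      · by_cases hin : fget f (dd.2 + i) (dd.1 + j) = false ∧
            gget (gset g (dd.2 + i) (dd.1 + j)
              (PySem.Int.mod (gget g (dd.2 + i) (dd.1 + j) + 1) 10)) (dd.2 + i) (dd.1 + j) = 0
        · rw [show aStep n dd i j h w (c, g, f) =
              (c + (surroundRec n (gset g (dd.2 + i) (dd.1 + j)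
                  (PySem.Int.mod (gget g (dd.2 + i) (dd.1 + j) + 1) 10)) f (dd.2 + i) (dd.1 + j) h w).1,
               (surroundRec n (gset g (dd.2 + i) (dd.1 + j)
                  (PySem.Int.mod (gget g (dd.2 + i) (dd.1 + j) + 1) 10)) f (dd.2 + i) (dd.1 + j) h w).2) from by
            unfold aStep; rw [if_pos hg, if_pos hin]]
          have hIg : pvInv (gset g (dd.2 + i) (dd.1 + j)
              (PySem.Int.mod (gget g (dd.2 + i) (dd.1 + j) + 1) 10)) f h w := pvInv_gset _ _ _ hI
          cases n with
          | zero =>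
            rw [show surroundRec 0 (gset g (dd.2 + i) (dd.1 + j)
                (PySem.Int.mod (gget g (dd.2 + i) (dd.1 + j) + 1) 10)) f (dd.2 + i) (dd.1 + j) h w =
              (0, gset g (dd.2 + i) (dd.1 + j)
                (PySem.Int.mod (gget g (dd.2 + i) (dd.1 + j) + 1) 10), f) from rfl]
            exact ihds i j h w (c + 0) _ f hIg
          | succ m =>
            rw [show surroundRec (m + 1) (gset g (dd.2 + i) (dd.1 + j)
                (PySem.Int.mod (gget g (dd.2 + i) (dd.1 + j) + 1) 10)) f (dd.2 + i) (dd.1 + j) h w =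
              aLoopF m dirsA (dd.2 + i) (dd.1 + j) h w (1, gset g (dd.2 + i) (dd.1 + j)
                (PySem.Int.mod (gget g (dd.2 + i) (dd.1 + j) + 1) 10),
                fsetw f (dd.2 + i) (dd.1 + j) true) from rfl]
            have hsub := IH m (by omega) dirsA (dd.2 + i) (dd.1 + j) h w 1
              (gset g (dd.2 + i) (dd.1 + j) (PySem.Int.mod (gget g (dd.2 + i) (dd.1 + j) + 1) 10))
              (fsetw f (dd.2 + i) (dd.1 + j) true) (pvInv_fsetw _ _ _ hIg)
            rcases hout : aLoopF m dirsA (dd.2 + i) (dd.1 + j) h w (1, gset g (dd.2 + i) (dd.1 + j)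
                (PySem.Int.mod (gget g (dd.2 + i) (dd.1 + j) + 1) 10),
                fsetw f (dd.2 + i) (dd.1 + j) true) with ⟨o1, o2, o3⟩
            rw [hout] at hsub
            have hstep := ihds i j h w (c + o1) o2 o3 hsub.1
            have hle := pvCf_fsetw_le f (dd.2 + i) (dd.1 + j)
            refine ⟨hstep.1, ?_⟩
            have h2 : pvCf (aLoopF (m + 1) ds i j h w (c + (o1, o2, o3).1, (o1, o2, o3).2)).2.2 =
                pvCf (aLoopF (m + 1) ds i j h w (c + o1, o2, o3)).2.2 := rfl
            have h3 : pvCf o3 ≤ pvCf (fsetw f (dd.2 + i) (dd.1 + j) true) := hsub.2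
            rw [h2]
            have h4 := hstep.2
            omega
        · rw [show aStep n dd i j h w (c, g, f) = (c, gset g (dd.2 + i) (dd.1 + j)
              (PySem.Int.mod (gget g (dd.2 + i) (dd.1 + j) + 1) 10), f) from by
            unfold aStep; rw [if_pos hg, if_neg hin]]
          exact ihds i j h w c _ f (pvInv_gset _ _ _ hI)
      · rw [show aStep n dd i j h w (c, g, f) = (c, g, f) from by unfold aStep; rw [if_neg hg]]
        exact ihds i j h w c g f hI

-- stepping lemmas for B's machine --------------------------------------------

theorem mach_nil (n : Nat) (c : Int) (g : List (List Int)) (f : List (List Bool)) (h w : Int) :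
    mach (n + 1) [] c g f h w = some c := by
  simp [mach]

theorem mach_k8 {k : Nat} (hk : ¬ k < 8) (n : Nat) (r c : Int)
    (rest : List (Int × Int × Nat)) (total : Int) (g : List (List Int)) (f : List (List Bool))
    (h w : Int) :
    mach (n + 1) ((r, c, k) :: rest) total g f h w = mach n rest total g f h w := by
  simp only [mach]
  rw [if_neg hk]

theorem mach_oob {k : Nat} (hk : k < 8) (n : Nat) (r c : Int)
    (rest : List (Int × Int × Nat)) (total : Int) (g : List (List Int)) (f : List (List Bool))
    (h w : Int)
    (hc : ((dirsB.getD k ((0:Int),(0:Int))).2 + r) < 0 ∨ ((dirsB.getD k ((0:Int),(0:Int))).2 + r) ≥ h ∨ ((dirsB.getD k ((0:Int),(0:Int))).1 + c) < 0 ∨ ((dirsB.getD k ((0:Int),(0:Int))).1 + c) ≥ w) :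
    mach (n + 1) ((r, c, k) :: rest) total g f h w =
      mach n ((r, c, k + 1) :: rest) total g f h w := by
  simp only [mach]
  rw [if_pos hk, if_pos hc]

theorem mach_zero {k : Nat} (hk : k < 8) (n : Nat) (r c : Int)
    (rest : List (Int × Int × Nat)) (total : Int) (g : List (List Int)) (f : List (List Bool))
    (h w : Int)
    (hc : ¬ (((dirsB.getD k ((0:Int),(0:Int))).2 + r) < 0 ∨ ((dirsB.getD k ((0:Int),(0:Int))).2 + r) ≥ h ∨ ((dirsB.getD k ((0:Int),(0:Int))).1 + c) < 0 ∨ ((dirsB.getD k ((0:Int),(0:Int))).1 + c) ≥ w))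
    (hz : gget g ((dirsB.getD k ((0:Int),(0:Int))).2 + r) ((dirsB.getD k ((0:Int),(0:Int))).1 + c) = 0) :
    mach (n + 1) ((r, c, k) :: rest) total g f h w =
      mach n ((r, c, k + 1) :: rest) total g f h w := by
  simp only [mach]
  rw [if_pos hk, if_neg hc, if_pos hz]

theorem mach_push {k : Nat} (hk : k < 8) (n : Nat) (r c : Int)
    (rest : List (Int × Int × Nat)) (total : Int) (g : List (List Int)) (f : List (List Bool))
    (h w : Int)
    (hc : ¬ (((dirsB.getD k ((0:Int),(0:Int))).2 + r) < 0 ∨ ((dirsB.getD k ((0:Int),(0:Int))).2 + r) ≥ h ∨ ((dirsB.getD k ((0:Int),(0:Int))).1 + c) < 0 ∨ ((dirsB.getD k ((0:Int),(0:Int))).1 + c) ≥ w))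
    (hz : ¬ gget g ((dirsB.getD k ((0:Int),(0:Int))).2 + r) ((dirsB.getD k ((0:Int),(0:Int))).1 + c) = 0)
    (hv : (PySem.Int.mod (gget g ((dirsB.getD k ((0:Int),(0:Int))).2 + r) ((dirsB.getD k ((0:Int),(0:Int))).1 + c) + 1) 10) = 0 ∧ fget f ((dirsB.getD k ((0:Int),(0:Int))).2 + r) ((dirsB.getD k ((0:Int),(0:Int))).1 + c) = false) :
    mach (n + 1) ((r, c, k) :: rest) total g f h w =
      mach n ((((dirsB.getD k ((0:Int),(0:Int))).2 + r), ((dirsB.getD k ((0:Int),(0:Int))).1 + c), 0) :: (r, c, k + 1) :: rest) (total + 1)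
        (gset g ((dirsB.getD k ((0:Int),(0:Int))).2 + r) ((dirsB.getD k ((0:Int),(0:Int))).1 + c) (PySem.Int.mod (gget g ((dirsB.getD k ((0:Int),(0:Int))).2 + r) ((dirsB.getD k ((0:Int),(0:Int))).1 + c) + 1) 10)) (fsetw f ((dirsB.getD k ((0:Int),(0:Int))).2 + r) ((dirsB.getD k ((0:Int),(0:Int))).1 + c) true) h w := by
  simp only [mach]
  rw [if_pos hk, if_neg hc, if_neg hz, if_pos hv]

theorem mach_nf {k : Nat} (hk : k < 8) (n : Nat) (r c : Int)
    (rest : List (Int × Int × Nat)) (total : Int) (g : List (List Int)) (f : List (List Bool))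
    (h w : Int)
    (hc : ¬ (((dirsB.getD k ((0:Int),(0:Int))).2 + r) < 0 ∨ ((dirsB.getD k ((0:Int),(0:Int))).2 + r) ≥ h ∨ ((dirsB.getD k ((0:Int),(0:Int))).1 + c) < 0 ∨ ((dirsB.getD k ((0:Int),(0:Int))).1 + c) ≥ w))
    (hz : ¬ gget g ((dirsB.getD k ((0:Int),(0:Int))).2 + r) ((dirsB.getD k ((0:Int),(0:Int))).1 + c) = 0)
    (hv : ¬ ((PySem.Int.mod (gget g ((dirsB.getD k ((0:Int),(0:Int))).2 + r) ((dirsB.getD k ((0:Int),(0:Int))).1 + c) + 1) 10) = 0 ∧ fget f ((dirsB.getD k ((0:Int),(0:Int))).2 + r) ((dirsB.getD k ((0:Int),(0:Int))).1 + c) = false)) :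
    mach (n + 1) ((r, c, k) :: rest) total g f h w =
      mach n ((r, c, k + 1) :: rest) total (gset g ((dirsB.getD k ((0:Int),(0:Int))).2 + r) ((dirsB.getD k ((0:Int),(0:Int))).1 + c) (PySem.Int.mod (gget g ((dirsB.getD k ((0:Int),(0:Int))).2 + r) ((dirsB.getD k ((0:Int),(0:Int))).1 + c) + 1) 10)) f h w := by
  simp only [mach]
  rw [if_pos hk, if_neg hc, if_neg hz, if_neg hv]

-- more fuel never changes a completed run of the machine ----------------------

theorem mach_mono (n : Nat) : ∀ (s : List (Int × Int × Nat)) (total : Int) (g : List (List Int))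
    (f : List (List Bool)) (h w : Int) (r0 : Int), mach n s total g f h w = some r0 →
    mach (n + 1) s total g f h w = some r0 := by
  induction n with
  | zero => intro s total g f h w r0 hm; simp [mach] at hm
  | succ n ih =>
    intro s total g f h w r0 hm
    cases s with
    | nil => rw [mach_nil] at hm ⊢; exact hm
    | cons fr rest =>
      obtain ⟨r, c, k⟩ := fr
      by_cases hk : k < 8
      · by_cases hc : ((dirsB.getD k ((0:Int),(0:Int))).2 + r) < 0 ∨ ((dirsB.getD k ((0:Int),(0:Int))).2 + r) ≥ h ∨ ((dirsB.getD k ((0:Int),(0:Int))).1 + c) < 0 ∨ ((dirsB.getD k ((0:Int),(0:Int))).1 + c) ≥ w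
        · rw [mach_oob hk (hc := hc)] at hm ⊢; exact ih _ _ _ _ _ _ _ hm
        · by_cases hz : gget g ((dirsB.getD k ((0:Int),(0:Int))).2 + r) ((dirsB.getD k ((0:Int),(0:Int))).1 + c) = 0
          · rw [mach_zero hk (hc := hc) (hz := hz)] at hm ⊢; exact ih _ _ _ _ _ _ _ hm
          · by_cases hv : (PySem.Int.mod (gget g ((dirsB.getD k ((0:Int),(0:Int))).2 + r) ((dirsB.getD k ((0:Int),(0:Int))).1 + c) + 1) 10) = 0 ∧ fget f ((dirsB.getD k ((0:Int),(0:Int))).2 + r) ((dirsB.getD k ((0:Int),(0:Int))).1 + c) = false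
            · rw [mach_push hk (hc := hc) (hz := hz) (hv := hv)] at hm ⊢; exact ih _ _ _ _ _ _ _ hm
            · rw [mach_nf hk (hc := hc) (hz := hz) (hv := hv)] at hm ⊢; exact ih _ _ _ _ _ _ _ hm
      · rw [mach_k8 hk] at hm ⊢; exact ih _ _ _ _ _ _ _ hm

theorem mach_mono_le {n m : Nat} (hnm : n ≤ m) (s : List (Int × Int × Nat)) (c : Int)
    (g : List (List Int)) (f : List (List Bool)) (h w : Int) (r : Int)
    (hm : mach n s c g f h w = some r) : mach m s c g f h w = some r := by
  induction m, hnm using Nat.le_induction with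
  | base => exact hm
  | succ m hm' ih => exact mach_mono m _ _ _ _ _ _ _ ih

-- with enough fuel the machine completes --------------------------------------

theorem pv_inrange {g : List (List Int)} {f : List (List Bool)} {h w : Int}
    (hI : pvInv g f h w) {y x : Int} (hy0 : 0 ≤ y) (hyh : y < h) (hx0 : 0 ≤ x) (hxw : x < w) :
    y.toNat < f.length ∧ x.toNat < (f.getD y.toNat []).length := by
  obtain ⟨h1, h2, h3⟩ := hI
  have hyn : y.toNat < h.toNat := by omega
  have := h3 y.toNat hyn
  omega

def wsum (s : List (Int × Int × Nat)) : Nat := (s.map (fun fr => 9 - fr.2.2)).sum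

theorem wsum_cons (ci cj : Int) (k : Nat) (rest : List (Int × Int × Nat)) :
    wsum ((ci, cj, k) :: rest) = (9 - k) + wsum rest := by
  simp [wsum]

theorem mach_some (n : Nat) : ∀ (s : List (Int × Int × Nat)) (total : Int) (g : List (List Int))
    (f : List (List Bool)) (h w : Int), pvInv g f h w → (∀ fr ∈ s, fr.2.2 ≤ 8) →
    9 * pvCf f + wsum s < n → ∃ r0, mach n s total g f h w = some r0 := by
  induction n with
  | zero => intro s total g f h w _ _ hmeas; omega
  | succ n ih =>
    intro s total g f h w hI hwf hmeas
    cases s with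
    | nil => exact ⟨total, mach_nil n total g f h w⟩
    | cons fr rest =>
      obtain ⟨r, c, k⟩ := fr
      have hk8 : k ≤ 8 := hwf (r, c, k) (by simp)
      have hwr : ∀ fr ∈ rest, fr.2.2 ≤ 8 := fun fr hfr => hwf fr (by simp [hfr])
      rw [wsum_cons] at hmeas
      by_cases hk : k < 8
      · have hwr1 : ∀ fr ∈ (r, c, k + 1) :: rest, fr.2.2 ≤ 8 := by
          intro fr hfr
          simp at hfr
          rcases hfr with hfr | hfr
          · simp [hfr]; omega
          · exact hwr fr hfr
        by_cases hc : ((dirsB.getD k ((0:Int),(0:Int))).2 + r) < 0 ∨ ((dirsB.getD k ((0:Int),(0:Int))).2 + r) ≥ h ∨ ((dirsB.getD k ((0:Int),(0:Int))).1 + c) < 0 ∨ ((dirsB.getD k ((0:Int),(0:Int))).1 + c) ≥ w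
        · rw [mach_oob hk (hc := hc)]
          apply ih _ _ _ _ _ _ hI hwr1
          rw [wsum_cons]; omega
        · by_cases hz : gget g ((dirsB.getD k ((0:Int),(0:Int))).2 + r) ((dirsB.getD k ((0:Int),(0:Int))).1 + c) = 0
          · rw [mach_zero hk (hc := hc) (hz := hz)]
            apply ih _ _ _ _ _ _ hI hwr1
            rw [wsum_cons]; omega
          · by_cases hv : (PySem.Int.mod (gget g ((dirsB.getD k ((0:Int),(0:Int))).2 + r) ((dirsB.getD k ((0:Int),(0:Int))).1 + c) + 1) 10) = 0 ∧ fget f ((dirsB.getD k ((0:Int),(0:Int))).2 + r) ((dirsB.getD k ((0:Int),(0:Int))).1 + c) = false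
            · rw [mach_push hk (hc := hc) (hz := hz) (hv := hv)]
              have hb : 0 ≤ ((dirsB.getD k ((0:Int),(0:Int))).2 + r) ∧ ((dirsB.getD k ((0:Int),(0:Int))).2 + r) < h ∧ 0 ≤ ((dirsB.getD k ((0:Int),(0:Int))).1 + c) ∧ ((dirsB.getD k ((0:Int),(0:Int))).1 + c) < w := by omega
              obtain ⟨hyf, hxf⟩ := pv_inrange hI hb.1 hb.2.1 hb.2.2.1 hb.2.2.2
              have hcf := pvCf_fsetw_false f ((dirsB.getD k ((0:Int),(0:Int))).2 + r) ((dirsB.getD k ((0:Int),(0:Int))).1 + c) hb.1 hyf hb.2.2.1 hxf hv.2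
              apply ih
              · exact pvInv_fsetw _ _ _ (pvInv_gset _ _ _ hI)
              · intro fr hfr
                simp at hfr
                rcases hfr with hfr | hfr | hfr
                · simp [hfr]
                · simp [hfr]; omega
                · exact hwr fr hfr
              · rw [wsum_cons, wsum_cons]
                omega
            · rw [mach_nf hk (hc := hc) (hz := hz) (hv := hv)]
              apply ih _ _ _ _ _ _ (pvInv_gset _ _ _ hI) hwr1
              rw [wsum_cons]; omega
      · rw [mach_k8 hk]
        apply ih _ _ _ _ _ _ hI hwr
        omega

-- reading back the just-written cell, and g-side index bounds ------------------

theorem pv_inrange_g {g : List (List Int)} {f : List (List Bool)} {h w : Int}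
    (hI : pvInv g f h w) {y x : Int} (hy0 : 0 ≤ y) (hyh : y < h) (hx0 : 0 ≤ x) (hxw : x < w) :
    y.toNat < g.length ∧ x.toNat < (g.getD y.toNat []).length := by
  obtain ⟨h1, h2, h3⟩ := hI
  have hyn : y.toNat < h.toNat := by omega
  have := h3 y.toNat hyn
  omega

theorem gget_gset_self (g : List (List Int)) (y x v : Int)
    (hy : y.toNat < g.length) (hx : x.toNat < (g.getD y.toNat []).length) :
    gget (gset g y x v) y x = v := by
  unfold gget gset
  rw [pv_getD_set, if_pos ⟨rfl, hy⟩, pv_getD_set, if_pos ⟨rfl, hx⟩]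

-- the simulation: B's machine runs A's loop, frame by frame -------------------

theorem pv_sim8 (n : Nat) (i j h w c : Int) (g : List (List Int)) (f : List (List Bool))
    (rest : List (Int × Int × Nat)) (r : Int)
    (hrun : ∃ m, mach m rest (aLoopF n (dirsA.drop 8) i j h w (c, g, f)).1
        (aLoopF n (dirsA.drop 8) i j h w (c, g, f)).2.1
        (aLoopF n (dirsA.drop 8) i j h w (c, g, f)).2.2 h w = some r) :
    ∃ m, mach m ((i, j, 8) :: rest) c g f h w = some r := by
  rw [show dirsA.drop 8 = ([] : List (Int × Int)) from rfl, aLoopF_nil] at hrun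
  obtain ⟨m, hm⟩ := hrun
  exact ⟨m + 1, by rw [mach_k8 (by omega)]; exact hm⟩

theorem pv_sim : ∀ (μ n k : Nat) (i j h w c : Int) (g : List (List Int)) (f : List (List Bool))
    (rest : List (Int × Int × Nat)) (r : Int),
    9 * n + 8 - k ≤ μ → k ≤ 8 → pvInv g f h w → pvCf f ≤ n →
    (∃ m, mach m rest (aLoopF n (dirsA.drop k) i j h w (c, g, f)).1
        (aLoopF n (dirsA.drop k) i j h w (c, g, f)).2.1
        (aLoopF n (dirsA.drop k) i j h w (c, g, f)).2.2 h w = some r) →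
    ∃ m, mach m ((i, j, k) :: rest) c g f h w = some r := by
  intro μ
  induction μ with
  | zero =>
    intro n k i j h w c g f rest r hμ hk hI hcf hrun
    have hk8 : k = 8 := by omega
    subst hk8
    exact pv_sim8 n i j h w c g f rest r hrun
  | succ μ ihμ =>
    intro n k i j h w c g f rest r hμ hk hI hcf hrun
    by_cases hklt : k < 8
    · have hdrop : dirsA.drop k = dirsA.getD k ((0:Int),(0:Int)) :: dirsA.drop (k + 1) := by
        interval_cases k <;> rfl
      rw [hdrop, aLoopF_cons] at hrun
      by_cases hg : 0 ≤ ((dirsA.getD k ((0:Int),(0:Int))).2 + i) ∧ ((dirsA.getD k ((0:Int),(0:Int))).2 + i) < h ∧ 0 ≤ ((dirsA.getD k ((0:Int),(0:Int))).1 + j) ∧ ((dirsA.getD k ((0:Int),(0:Int))).1 + j) < w ∧ gget g ((dirsA.getD k ((0:Int),(0:Int))).2 + i) ((dirsA.getD k ((0:Int),(0:Int))).1 + j) ≠ 0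
      · by_cases hin : fget f ((dirsA.getD k ((0:Int),(0:Int))).2 + i) ((dirsA.getD k ((0:Int),(0:Int))).1 + j) = false ∧ gget (gset g ((dirsA.getD k ((0:Int),(0:Int))).2 + i) ((dirsA.getD k ((0:Int),(0:Int))).1 + j) (PySem.Int.mod (gget g ((dirsA.getD k ((0:Int),(0:Int))).2 + i) ((dirsA.getD k ((0:Int),(0:Int))).1 + j) + 1) 10)) ((dirsA.getD k ((0:Int),(0:Int))).2 + i) ((dirsA.getD k ((0:Int),(0:Int))).1 + j) = 0
        · -- the neighbour flashes: A recurses where B pushes a frame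
          rw [show aStep n (dirsA.getD k ((0:Int),(0:Int))) i j h w (c, g, f) =
              (c + (surroundRec n (gset g ((dirsA.getD k ((0:Int),(0:Int))).2 + i) ((dirsA.getD k ((0:Int),(0:Int))).1 + j) (PySem.Int.mod (gget g ((dirsA.getD k ((0:Int),(0:Int))).2 + i) ((dirsA.getD k ((0:Int),(0:Int))).1 + j) + 1) 10)) f ((dirsA.getD k ((0:Int),(0:Int))).2 + i) ((dirsA.getD k ((0:Int),(0:Int))).1 + j) h w).1,
               (surroundRec n (gset g ((dirsA.getD k ((0:Int),(0:Int))).2 + i) ((dirsA.getD k ((0:Int),(0:Int))).1 + j) (PySem.Int.mod (gget g ((dirsA.getD k ((0:Int),(0:Int))).2 + i) ((dirsA.getD k ((0:Int),(0:Int))).1 + j) + 1) 10)) f ((dirsA.getD k ((0:Int),(0:Int))).2 + i) ((dirsA.getD k ((0:Int),(0:Int))).1 + j) h w).2) from by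
            unfold aStep; rw [if_pos hg, if_pos hin]] at hrun
          obtain ⟨hyf, hxf⟩ := pv_inrange hI hg.1 hg.2.1 hg.2.2.1 hg.2.2.2.1
          have hcfd := pvCf_fsetw_false f ((dirsA.getD k ((0:Int),(0:Int))).2 + i) ((dirsA.getD k ((0:Int),(0:Int))).1 + j) hg.1 hyf hg.2.2.1 hxf hin.1
          obtain ⟨m', rfl⟩ : ∃ m', n = m' + 1 := ⟨n - 1, by omega⟩
          rw [show surroundRec (m' + 1) (gset g ((dirsA.getD k ((0:Int),(0:Int))).2 + i) ((dirsA.getD k ((0:Int),(0:Int))).1 + j) (PySem.Int.mod (gget g ((dirsA.getD k ((0:Int),(0:Int))).2 + i) ((dirsA.getD k ((0:Int),(0:Int))).1 + j) + 1) 10)) f ((dirsA.getD k ((0:Int),(0:Int))).2 + i) ((dirsA.getD k ((0:Int),(0:Int))).1 + j) h w =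
              aLoopF m' dirsA ((dirsA.getD k ((0:Int),(0:Int))).2 + i) ((dirsA.getD k ((0:Int),(0:Int))).1 + j) h w (1, (gset g ((dirsA.getD k ((0:Int),(0:Int))).2 + i) ((dirsA.getD k ((0:Int),(0:Int))).1 + j) (PySem.Int.mod (gget g ((dirsA.getD k ((0:Int),(0:Int))).2 + i) ((dirsA.getD k ((0:Int),(0:Int))).1 + j) + 1) 10)), (fsetw f ((dirsA.getD k ((0:Int),(0:Int))).2 + i) ((dirsA.getD k ((0:Int),(0:Int))).1 + j) true)) from rfl] at hrun
          have hIg : pvInv (gset g ((dirsA.getD k ((0:Int),(0:Int))).2 + i) ((dirsA.getD k ((0:Int),(0:Int))).1 + j) (PySem.Int.mod (gget g ((dirsA.getD k ((0:Int),(0:Int))).2 + i) ((dirsA.getD k ((0:Int),(0:Int))).1 + j) + 1) 10)) (fsetw f ((dirsA.getD k ((0:Int),(0:Int))).2 + i) ((dirsA.getD k ((0:Int),(0:Int))).1 + j) true) h w := pvInv_fsetw _ _ _ (pvInv_gset _ _ _ hI)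
          have hmono := pv_mono m' dirsA ((dirsA.getD k ((0:Int),(0:Int))).2 + i) ((dirsA.getD k ((0:Int),(0:Int))).1 + j) h w 1 (gset g ((dirsA.getD k ((0:Int),(0:Int))).2 + i) ((dirsA.getD k ((0:Int),(0:Int))).1 + j) (PySem.Int.mod (gget g ((dirsA.getD k ((0:Int),(0:Int))).2 + i) ((dirsA.getD k ((0:Int),(0:Int))).1 + j) + 1) 10)) (fsetw f ((dirsA.getD k ((0:Int),(0:Int))).2 + i) ((dirsA.getD k ((0:Int),(0:Int))).1 + j) true) hIg
          rcases hout : aLoopF m' dirsA ((dirsA.getD k ((0:Int),(0:Int))).2 + i) ((dirsA.getD k ((0:Int),(0:Int))).1 + j) h w (1, (gset g ((dirsA.getD k ((0:Int),(0:Int))).2 + i) ((dirsA.getD k ((0:Int),(0:Int))).1 + j) (PySem.Int.mod (gget g ((dirsA.getD k ((0:Int),(0:Int))).2 + i) ((dirsA.getD k ((0:Int),(0:Int))).1 + j) + 1) 10)), (fsetw f ((dirsA.getD k ((0:Int),(0:Int))).2 + i) ((dirsA.getD k ((0:Int),(0:Int))).1 + j) true)) with ⟨o1, o2, o3⟩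
          rw [hout] at hrun hmono
          have hInv2 : pvInv o2 o3 h w := hmono.1
          have hcf3 : pvCf o3 ≤ pvCf (fsetw f ((dirsA.getD k ((0:Int),(0:Int))).2 + i) ((dirsA.getD k ((0:Int),(0:Int))).1 + j) true) := hmono.2
          have h1 := ihμ (m' + 1) (k + 1) i j h w (c + o1) o2 o3 rest r (by omega) (by omega)
            hInv2 (by omega) hrun
          have hsh : aLoopF m' (dirsA.drop 0) ((dirsA.getD k ((0:Int),(0:Int))).2 + i) ((dirsA.getD k ((0:Int),(0:Int))).1 + j) h w (c + 1, (gset g ((dirsA.getD k ((0:Int),(0:Int))).2 + i) ((dirsA.getD k ((0:Int),(0:Int))).1 + j) (PySem.Int.mod (gget g ((dirsA.getD k ((0:Int),(0:Int))).2 + i) ((dirsA.getD k ((0:Int),(0:Int))).1 + j) + 1) 10)), (fsetw f ((dirsA.getD k ((0:Int),(0:Int))).2 + i) ((dirsA.getD k ((0:Int),(0:Int))).1 + j) true)) = (c + o1, o2, o3) := by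
            rw [show dirsA.drop 0 = dirsA from rfl,
              aLoopF_shift m' dirsA ((dirsA.getD k ((0:Int),(0:Int))).2 + i) ((dirsA.getD k ((0:Int),(0:Int))).1 + j) h w (c + 1) (gset g ((dirsA.getD k ((0:Int),(0:Int))).2 + i) ((dirsA.getD k ((0:Int),(0:Int))).1 + j) (PySem.Int.mod (gget g ((dirsA.getD k ((0:Int),(0:Int))).2 + i) ((dirsA.getD k ((0:Int),(0:Int))).1 + j) + 1) 10)) (fsetw f ((dirsA.getD k ((0:Int),(0:Int))).2 + i) ((dirsA.getD k ((0:Int),(0:Int))).1 + j) true)]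
            rw [aLoopF_shift m' dirsA ((dirsA.getD k ((0:Int),(0:Int))).2 + i) ((dirsA.getD k ((0:Int),(0:Int))).1 + j) h w 1 (gset g ((dirsA.getD k ((0:Int),(0:Int))).2 + i) ((dirsA.getD k ((0:Int),(0:Int))).1 + j) (PySem.Int.mod (gget g ((dirsA.getD k ((0:Int),(0:Int))).2 + i) ((dirsA.getD k ((0:Int),(0:Int))).1 + j) + 1) 10)) (fsetw f ((dirsA.getD k ((0:Int),(0:Int))).2 + i) ((dirsA.getD k ((0:Int),(0:Int))).1 + j) true)] at hout
            rcases hbase : aLoopF m' dirsA ((dirsA.getD k ((0:Int),(0:Int))).2 + i) ((dirsA.getD k ((0:Int),(0:Int))).1 + j) h w (0, (gset g ((dirsA.getD k ((0:Int),(0:Int))).2 + i) ((dirsA.getD k ((0:Int),(0:Int))).1 + j) (PySem.Int.mod (gget g ((dirsA.getD k ((0:Int),(0:Int))).2 + i) ((dirsA.getD k ((0:Int),(0:Int))).1 + j) + 1) 10)), (fsetw f ((dirsA.getD k ((0:Int),(0:Int))).2 + i) ((dirsA.getD k ((0:Int),(0:Int))).1 + j) true)) with ⟨b1, b2, b3⟩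
            rw [hbase] at hout
            obtain ⟨he1, he2, he3⟩ : 1 + b1 = o1 ∧ b2 = o2 ∧ b3 = o3 := by
              simpa using hout
            subst he2
            subst he3
            rw [← he1]
            simp [add_assoc]
          have h2 := ihμ m' 0 ((dirsA.getD k ((0:Int),(0:Int))).2 + i) ((dirsA.getD k ((0:Int),(0:Int))).1 + j) h w (c + 1) (gset g ((dirsA.getD k ((0:Int),(0:Int))).2 + i) ((dirsA.getD k ((0:Int),(0:Int))).1 + j) (PySem.Int.mod (gget g ((dirsA.getD k ((0:Int),(0:Int))).2 + i) ((dirsA.getD k ((0:Int),(0:Int))).1 + j) + 1) 10)) (fsetw f ((dirsA.getD k ((0:Int),(0:Int))).2 + i) ((dirsA.getD k ((0:Int),(0:Int))).1 + j) true) ((i, j, k + 1) :: rest) r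
            (by omega) (by omega) hIg (by omega) (by rw [hsh]; exact h1)
          obtain ⟨m, hm⟩ := h2
          have hcB : ¬ (((dirsA.getD k ((0:Int),(0:Int))).2 + i) < 0 ∨ ((dirsA.getD k ((0:Int),(0:Int))).2 + i) ≥ h ∨ ((dirsA.getD k ((0:Int),(0:Int))).1 + j) < 0 ∨ ((dirsA.getD k ((0:Int),(0:Int))).1 + j) ≥ w) := by
            obtain ⟨hb1, hb2, hb3, hb4, _⟩ := hg
            omega
          have hzB : ¬ gget g ((dirsA.getD k ((0:Int),(0:Int))).2 + i) ((dirsA.getD k ((0:Int),(0:Int))).1 + j) = 0 := hg.2.2.2.2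
          obtain ⟨hyg, hxg⟩ := pv_inrange_g hI hg.1 hg.2.1 hg.2.2.1 hg.2.2.2.1
          have hggs := gget_gset_self g ((dirsA.getD k ((0:Int),(0:Int))).2 + i) ((dirsA.getD k ((0:Int),(0:Int))).1 + j) (PySem.Int.mod (gget g ((dirsA.getD k ((0:Int),(0:Int))).2 + i) ((dirsA.getD k ((0:Int),(0:Int))).1 + j) + 1) 10) hyg hxg
          have hvB : (PySem.Int.mod (gget g ((dirsA.getD k ((0:Int),(0:Int))).2 + i) ((dirsA.getD k ((0:Int),(0:Int))).1 + j) + 1) 10) = 0 ∧ fget f ((dirsA.getD k ((0:Int),(0:Int))).2 + i) ((dirsA.getD k ((0:Int),(0:Int))).1 + j) = false := ⟨by rw [← hggs]; exact hin.2, hin.1⟩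
          refine ⟨m + 1, ?_⟩
          rw [mach_push hklt (hc := hcB) (hz := hzB) (hv := hvB)]
          exact hm
        · -- the neighbour is incremented but does not flash
          rw [show aStep n (dirsA.getD k ((0:Int),(0:Int))) i j h w (c, g, f) =
              (c, (gset g ((dirsA.getD k ((0:Int),(0:Int))).2 + i) ((dirsA.getD k ((0:Int),(0:Int))).1 + j) (PySem.Int.mod (gget g ((dirsA.getD k ((0:Int),(0:Int))).2 + i) ((dirsA.getD k ((0:Int),(0:Int))).1 + j) + 1) 10)), f) from by unfold aStep; rw [if_pos hg, if_neg hin]] at hrun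
          have h1 := ihμ n (k + 1) i j h w c (gset g ((dirsA.getD k ((0:Int),(0:Int))).2 + i) ((dirsA.getD k ((0:Int),(0:Int))).1 + j) (PySem.Int.mod (gget g ((dirsA.getD k ((0:Int),(0:Int))).2 + i) ((dirsA.getD k ((0:Int),(0:Int))).1 + j) + 1) 10)) f rest r (by omega) (by omega)
            (pvInv_gset _ _ _ hI) hcf hrun
          obtain ⟨m, hm⟩ := h1
          have hcB : ¬ (((dirsA.getD k ((0:Int),(0:Int))).2 + i) < 0 ∨ ((dirsA.getD k ((0:Int),(0:Int))).2 + i) ≥ h ∨ ((dirsA.getD k ((0:Int),(0:Int))).1 + j) < 0 ∨ ((dirsA.getD k ((0:Int),(0:Int))).1 + j) ≥ w) := by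
            obtain ⟨hb1, hb2, hb3, hb4, _⟩ := hg
            omega
          have hzB : ¬ gget g ((dirsA.getD k ((0:Int),(0:Int))).2 + i) ((dirsA.getD k ((0:Int),(0:Int))).1 + j) = 0 := hg.2.2.2.2
          obtain ⟨hyg, hxg⟩ := pv_inrange_g hI hg.1 hg.2.1 hg.2.2.1 hg.2.2.2.1
          have hggs := gget_gset_self g ((dirsA.getD k ((0:Int),(0:Int))).2 + i) ((dirsA.getD k ((0:Int),(0:Int))).1 + j) (PySem.Int.mod (gget g ((dirsA.getD k ((0:Int),(0:Int))).2 + i) ((dirsA.getD k ((0:Int),(0:Int))).1 + j) + 1) 10) hyg hxg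
          have hvB : ¬ ((PySem.Int.mod (gget g ((dirsA.getD k ((0:Int),(0:Int))).2 + i) ((dirsA.getD k ((0:Int),(0:Int))).1 + j) + 1) 10) = 0 ∧ fget f ((dirsA.getD k ((0:Int),(0:Int))).2 + i) ((dirsA.getD k ((0:Int),(0:Int))).1 + j) = false) := by
            intro hvv
            exact hin ⟨hvv.2, by rw [hggs]; exact hvv.1⟩
          refine ⟨m + 1, ?_⟩
          rw [mach_nf hklt (hc := hcB) (hz := hzB) (hv := hvB)]
          exact hm
      · -- the neighbour is out of bounds or zero: nothing happens
        rw [show aStep n (dirsA.getD k ((0:Int),(0:Int))) i j h w (c, g, f) = (c, g, f) from by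
          unfold aStep; rw [if_neg hg]] at hrun
        have h1 := ihμ n (k + 1) i j h w c g f rest r (by omega) (by omega) hI hcf hrun
        obtain ⟨m, hm⟩ := h1
        by_cases hc : ((dirsA.getD k ((0:Int),(0:Int))).2 + i) < 0 ∨ ((dirsA.getD k ((0:Int),(0:Int))).2 + i) ≥ h ∨ ((dirsA.getD k ((0:Int),(0:Int))).1 + j) < 0 ∨ ((dirsA.getD k ((0:Int),(0:Int))).1 + j) ≥ w
        · refine ⟨m + 1, ?_⟩
          rw [mach_oob hklt (hc := hc)]
          exact hm
        · have hz : gget g ((dirsA.getD k ((0:Int),(0:Int))).2 + i) ((dirsA.getD k ((0:Int),(0:Int))).1 + j) = 0 := by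
            by_contra hz
            exact hg ⟨by omega, by omega, by omega, by omega, hz⟩
          refine ⟨m + 1, ?_⟩
          rw [mach_zero hklt (hc := hc) (hz := hz)]
          exact hm
    · have hk8 : k = 8 := by omega
      subst hk8
      exact pv_sim8 n i j h w c g f rest r hrun
-- ===== VERDICT (by name: the statement is the Claim_ definition above) =====
theorem surround_spec : Claim_equal_surround := by
  unfold Claim_equal_surround
  intro g flash i j h w _hdom hpre
  unfold Spec_surround
  obtain ⟨_, _, _, _, hp5, hp6, hp7⟩ := hpre
  have hI : pvInv g flash h w := ⟨hp5, hp6, hp7⟩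
  have hI0 : pvInv g (fsetw flash i j true) h w := pvInv_fsetw _ _ _ hI
  have hcf0 : pvCf (fsetw flash i j true) ≤ pvCf flash := pvCf_fsetw_le flash i j
  rcases hout : aLoopF (pvCf flash) dirsA i j h w (1, g, fsetw flash i j true) with ⟨o1, o2, o3⟩
  have hA : surround g flash i j h w = o1 := by
    unfold surround
    rw [show surroundRec (pvCf flash + 1) g flash i j h w =
      aLoopF (pvCf flash) dirsA i j h w (1, g, fsetw flash i j true) from rfl, hout]
  have hrun0 : ∃ m, mach m [] o1 o2 o3 h w = some o1 := ⟨1, mach_nil 0 o1 o2 o3 h w⟩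
  have hsim := pv_sim (9 * pvCf flash + 8) (pvCf flash) 0 i j h w 1 g
    (fsetw flash i j true) [] o1 (by omega) (by omega) hI0 hcf0
    (by rw [show dirsA.drop 0 = dirsA from rfl, hout]; exact hrun0)
  obtain ⟨m, hm⟩ := hsim
  have hsome := mach_some (9 * pvCf flash + 19) [(i, j, 0)] 1 g (fsetw flash i j true) h w hI0
    (by intro fr hfr; simp at hfr; simp [hfr])
    (by rw [show wsum [(i, j, (0:Nat))] = 9 from rfl]; omega)
  obtain ⟨rB, hrB⟩ := hsome
  have hm' := mach_mono_le (Nat.le_max_left m (9 * pvCf flash + 19)) _ _ _ _ _ _ _ hm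
  have hrB' := mach_mono_le (Nat.le_max_right m (9 * pvCf flash + 19)) _ _ _ _ _ _ _ hrB
  rw [hm'] at hrB'
  unfold surround_alt
  rw [hrB, hA]
  have : o1 = rB := by simpa using hrB'
  simp [this]
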